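-- pv_equiv track=rewrite | github.com/py2025/CS-101-Project | Milestone2.py | check_for_match
-- ===== SOURCE A (Python) =====
-- def cat_strings(str_list):
--     new_str_2 = ''
--     if str_list[0].find(str_list[2]) == 0:
--         new_str_2 += str_list[0].replace(str_list[2], '')
--         return str_list[1] + new_str_2
--     new_str_2 += str_list[1].replace(str_list[2], '')
--     return str_list[0] + new_str_2
--
-- def check_for_match(list1):
--     test_arr = []
--     #O(n^4) Who doesn't love quadric time complexity?
--     for dna in list1:
--         for i in range(len(dna)):
--             sub = dna[:i]
--             for dna1 in list1:
--                 largest_common = 0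
--                 for j in range(-2, -len(dna1) - 2, -1):
--                     if dna1 == dna:
--                         continue
--                     if dna1[-1:j:-1][::-1] == sub and len(dna1[-1:j:-1][::-1]) > largest_common:
--                         test_arr.append((dna, dna1, dna1[-1:j:-1][::-1]))
--                         largest_common = len(dna1[-1:j:-1][::-1])
--     list_of_cats = []
--     for l in test_arr:
--         list_of_cats.append(cat_strings(l))
--     return list_of_cats
-- ===== SOURCE B (Python) =====
-- def check_for_match(list1):
--     # One pass builds an index: suffix string -> strings (in list1 order) having it as a suffix.
--     suffix_index = {}
--     for s in list1:
--         for k in range(1, len(s) + 1):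
--             suffix_index.setdefault(s[-k:], []).append(s)
--     out = []
--     for dna in list1:
--         for i in range(1, len(dna)):
--             p = dna[:i]
--             for dna1 in suffix_index.get(p, []):
--                 if dna1 != dna:
--                     # p is a non-empty prefix of dna, so cat_strings' first branch
--                     # always fires: result = dna1 + dna with ALL occurrences of p removed.
--                     out.append(dna1 + dna.replace(p, ''))
--     return out
-- ===== Notes on version B (the rewrite author's own statement) =====
-- stated objective: faster
-- what changed: Replaces A's quadruple nested scan (every string x every prefix x every string x every suffix slice) by a precomputed dict from each suffix to the strings carrying it, then a prefix-lookup pass that also inlines cat_strings (the prefix branch always fires).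
import Mathlib
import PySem

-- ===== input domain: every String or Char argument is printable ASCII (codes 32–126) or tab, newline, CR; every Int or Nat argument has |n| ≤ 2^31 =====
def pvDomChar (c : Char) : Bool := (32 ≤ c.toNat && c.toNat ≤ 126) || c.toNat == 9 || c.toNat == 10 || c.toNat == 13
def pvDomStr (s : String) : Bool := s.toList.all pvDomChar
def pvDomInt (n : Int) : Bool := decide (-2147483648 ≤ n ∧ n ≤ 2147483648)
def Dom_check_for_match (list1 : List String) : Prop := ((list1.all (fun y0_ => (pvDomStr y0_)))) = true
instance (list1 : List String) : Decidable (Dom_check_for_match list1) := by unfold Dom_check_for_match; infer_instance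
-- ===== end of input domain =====

-- B replaces A's quadruple nested scan by a precomputed suffix->strings index plus a
-- prefix-lookup pass (objective: faster).

-- ===== PORT A =====
def cat_strings (t : String × String × String) : String :=
  let new_str_2 := ""
  if PySem.Str.find t.1 t.2.2 = 0 then
    t.2.1 ++ (new_str_2 ++ PySem.Str.replace t.1 t.2.2 "")
  else
    t.1 ++ (new_str_2 ++ PySem.Str.replace t.2.1 t.2.2 "")

-- the body of A's innermost `for j in range(-2, -len(dna1)-2, -1)` loop;
-- both slice?s have step -1 ≠ 0, so they are always `some` and `.getD ""` is exact
def jStep (dna sub dna1 : String) (st : List (String × String × String) × Int) (j : Int) :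
    List (String × String × String) × Int :=
  if dna1 == dna then st
  else
    let piece := (PySem.Str.slice?
      ((PySem.Str.slice? dna1 (some (-1)) (some j) (-1)).getD "") none none (-1)).getD ""
    if piece = sub ∧ PySem.Str.len piece > st.2 then
      (st.1 ++ [(dna, dna1, piece)], PySem.Str.len piece)
    else st

def check_for_match (list1 : List String) : List String :=
  let test_arr : List (String × String × String) :=
    list1.foldl (fun acc dna =>
      (PySem.List.pyRange 0 (PySem.Str.len dna) 1).foldl (fun acc i =>
        let sub := PySem.Str.slice dna none (some i)
        list1.foldl (fun acc dna1 =>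
          ((PySem.List.pyRange (-2) (-(PySem.Str.len dna1) - 2) (-1)).foldl
            (jStep dna sub dna1) (acc, 0)).1) acc) acc) []
  let list_of_cats : List String :=
    test_arr.foldl (fun acc l => acc ++ [cat_strings l]) []
  list_of_cats

-- ===== PORT B =====
def check_for_match_alt (list1 : List String) : List String :=
  let suffix_index : PySem.Dict String (List String) :=
    list1.foldl (fun d s =>
      (PySem.List.pyRange 1 (PySem.Str.len s + 1) 1).foldl
        (fun d k => d.modify (PySem.Str.slice s (some (-k)) none) [] (· ++ [s])) d)
      PySem.Dict.empty
  list1.foldl (fun out dna =>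
    (PySem.List.pyRange 1 (PySem.Str.len dna) 1).foldl (fun out i =>
      let p := PySem.Str.slice dna none (some i)
      (suffix_index.getD p []).foldl (fun out dna1 =>
        if dna1 ≠ dna then out ++ [dna1 ++ PySem.Str.replace dna p ""] else out) out) out) []

-- ===== PRECONDITION & SPEC =====
def Spec_check_for_match (list1 : List String) (out : List String) : Prop := out = check_for_match_alt list1
instance (list1 : List String) (out : List String) : Decidable (Spec_check_for_match list1 out) := by unfold Spec_check_for_match; infer_instance

-- ===== CLAIM (what is proved, stated in full; the proofs are below) =====
def Claim_equal_check_for_match : Prop := ∀ (list1 : List String), Dom_check_for_match list1 → Spec_check_for_match list1 (check_for_match list1)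

-- ===== LEMMAS AND PROOFS =====

-- p is a non-empty suffix of s: the condition under which A records (dna, s, p)
def suffB (p s : String) : Bool := decide (p.toList ≠ [] ∧ p.toList <:+ s.toList)

-- dna[:i] for a natural i
def pref (dna : String) (i : Nat) : String := String.ofList (dna.toList.take i)

-- the clean form of jStep at j = -2 - k (dna1 ≠ dna case)
def cleanStep (dna sub dna1 : String) (st : List (String × String × String) × Int) (k : Nat) :
    List (String × String × String) × Int :=
  if dna1.toList.drop (dna1.toList.length - (k + 1)) = sub.toList ∧ ((k : Int) + 1 > st.2) then
    (st.1 ++ [(dna, dna1, sub)], (k : Int) + 1)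
  else st

lemma fm_rev (L : List Char) (c : Nat) (hc : c ≤ L.length) :
    List.filterMap (fun k' => L[(L.length - 1 - k')]?) (List.range c)
      = (L.drop (L.length - c)).reverse := by
  induction c with
  | zero => simp
  | succ c ih =>
      have hc' : c ≤ L.length := by omega
      rw [List.range_succ, List.filterMap_append, ih hc']
      have h1 : L.length - 1 - c < L.length := by omega
      have h2 : L.drop (L.length - (c+1)) = L[L.length - 1 - c] :: L.drop (L.length - c) := by
        have heq : L.length - (c+1) = L.length - 1 - c := by omega
        have heq2 : L.length - c = (L.length - 1 - c) + 1 := by omega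
        rw [heq, heq2, List.drop_eq_getElem_cons h1]
      rw [h2]
      simp [List.getElem?_eq_getElem h1]

-- value of dna1[-1:j:-1] at j = -2 - k, for k < len(dna1)
lemma slice_rev_val (s : String) (k : Nat) (hk : k < s.toList.length) :
    PySem.Str.slice? s (some (-1)) (some (-2 - (k : Int))) (-1)
      = some (String.ofList ((s.toList.drop (s.toList.length - (k + 1))).reverse)) := by
  set L := s.toList with hL
  have hn : 0 < L.length := by omega
  simp only [PySem.Str.slice?, PySem.Chars.slice?_eq_listSlice?]
  rw [show (PySem.List.slice? L (some (-1)) (some (-2 - (k:Int))) (-1))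
      = some ((L.drop (L.length - (k+1))).reverse) from ?_]
  · rfl
  unfold PySem.List.slice? PySem.List.sliceIndices
  rw [if_neg (by norm_num : ¬ ((-1:Int) = 0))]
  simp only [if_pos (by norm_num : ((-1:Int) < 0)), if_pos (by omega : (-2 - (k:Int) < 0)),
    if_neg (by norm_num : ¬ ((0:Int) < -1))]
  rw [show max (-1 + (L.length:Int)) (-1) = (L.length:Int) - 1 by omega,
      show max (-2 - (k:Int) + (L.length:Int)) (-1) = (L.length:Int) - (k:Int) - 2 by omega,
      if_pos (by omega : (L.length:Int) - (k:Int) - 2 < (L.length:Int) - 1)]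
  rw [show (- -1 : Int) = 1 by norm_num]
  rw [show ((L.length:Int) - 1 - ((L.length:Int) - (k:Int) - 2) + 1 - 1) / 1 = ((k:Int) + 1) by
    rw [Int.ediv_one]; omega]
  rw [show ((k:Int)+1).toNat = k + 1 by omega]
  congr 1
  rw [List.filterMap_congr (g := fun k' => L[(L.length - 1 - k')]?) ?_]
  · exact fm_rev L (k+1) (by omega)
  · intro a ha
    simp only [List.mem_range] at ha
    congr 1
    omega

lemma jStep_eq_cleanStep (dna sub dna1 : String) (hne : dna1 ≠ dna) (k : Nat)
    (hk : k < dna1.toList.length) (st : List (String × String × String) × Int) :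
    jStep dna sub dna1 st (-2 - (k : Int)) = cleanStep dna sub dna1 st k := by
  unfold jStep cleanStep
  rw [if_neg (by simpa using hne)]
  rw [slice_rev_val dna1 k hk]
  simp only [Option.getD_some, PySem.Str.slice?_none_none_neg_one, String.toList_ofList,
    List.reverse_reverse]
  have hp : (String.ofList (dna1.toList.drop (dna1.toList.length - (k + 1)))) = sub
      ↔ dna1.toList.drop (dna1.toList.length - (k + 1)) = sub.toList := by
    constructor
    · intro h; rw [← h, String.toList_ofList]
    · intro h; rw [h, String.ofList_toList]
  have hlen : PySem.Str.len (String.ofList (dna1.toList.drop (dna1.toList.length - (k + 1))))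
      = (k : Int) + 1 := by
    have h0 : dna1.toList.length = dna1.length := by simp
    simp [PySem.Str.len_eq]
    omega
  rw [hlen]
  by_cases hc : dna1.toList.drop (dna1.toList.length - (k + 1)) = sub.toList ∧ ((k : Int) + 1 > st.2)
  · rw [if_pos ⟨hp.mpr hc.1, hc.2⟩, if_pos hc, hc.1, String.ofList_toList]
  · rw [if_neg, if_neg hc]
    intro h; exact hc ⟨hp.mp h.1, h.2⟩

-- the suffix of length m+1 equals subL iff subL is a suffix of exactly that length
lemma drop_eq_iff (L subL : List Char) (m : Nat) (hm : m < L.length) :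
    L.drop (L.length - (m + 1)) = subL ↔ (subL <:+ L ∧ subL.length = m + 1) := by
  constructor
  · intro h
    refine ⟨h ▸ List.drop_suffix _ _, ?_⟩
    rw [← h, List.length_drop]; omega
  · rintro ⟨hs, hl⟩
    rw [List.suffix_iff_eq_drop.mp hs, hl]

-- invariant of the cleaned j-loop: at most one k matches, at k = |sub| - 1
lemma cleanLoop_inv (dna sub dna1 : String) (acc : List (String × String × String)) (m : Nat)
    (hm : m ≤ dna1.toList.length) :
    (List.range m).foldl (cleanStep dna sub dna1) (acc, 0)
      = if sub.toList ≠ [] ∧ sub.toList <:+ dna1.toList ∧ sub.toList.length ≤ m then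
          (acc ++ [(dna, dna1, sub)], (sub.toList.length : Int))
        else (acc, 0) := by
  induction m with
  | zero =>
      rw [if_neg]; · simp
      rintro ⟨h1, _, h3⟩
      exact h1 (List.eq_nil_of_length_eq_zero (by omega))
  | succ m ih =>
      rw [List.range_succ, List.foldl_append, ih (by omega), List.foldl_cons, List.foldl_nil]
      have hkey := drop_eq_iff dna1.toList sub.toList m (by omega)
      by_cases hP : sub.toList ≠ [] ∧ sub.toList <:+ dna1.toList
      · by_cases hle : sub.toList.length ≤ m
        · rw [if_pos ⟨hP.1, hP.2, hle⟩, if_pos ⟨hP.1, hP.2, by omega⟩]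
          unfold cleanStep
          rw [if_neg]
          rintro ⟨h1, _⟩
          have := hkey.mp h1
          omega
        · by_cases heq : sub.toList.length = m + 1
          · rw [if_neg (by rintro ⟨_, _, h⟩; omega), if_pos ⟨hP.1, hP.2, by omega⟩]
            unfold cleanStep
            rw [if_pos ⟨hkey.mpr ⟨hP.2, heq⟩, by norm_num⟩, heq]
            simp
          · rw [if_neg (by rintro ⟨_, _, h⟩; omega), if_neg (by rintro ⟨_, _, h⟩; omega)]
            unfold cleanStep
            rw [if_neg]
            rintro ⟨h1, _⟩
            have := hkey.mp h1
            omega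
      · rw [if_neg (by rintro ⟨a, b, _⟩; exact hP ⟨a, b⟩), if_neg (by rintro ⟨a, b, _⟩; exact hP ⟨a, b⟩)]
        unfold cleanStep
        rw [if_neg]
        rintro ⟨h1, _⟩
        have := hkey.mp h1
        have h2 := this.2
        refine hP ⟨?_, this.1⟩
        intro hnil
        rw [hnil] at h2
        simp at h2

-- closed form of A's j-loop
lemma jLoop_eq (dna sub dna1 : String) (acc : List (String × String × String)) :
    ((PySem.List.pyRange (-2) (-(PySem.Str.len dna1) - 2) (-1)).foldl
      (jStep dna sub dna1) (acc, 0)).1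
    = acc ++ (if dna1 ≠ dna ∧ suffB sub dna1 then [(dna, dna1, sub)] else []) := by
  have hrange : PySem.List.pyRange (-2) (-(PySem.Str.len dna1) - 2) (-1)
      = (List.range dna1.toList.length).map (fun k : Nat => (-2 : Int) - (k : Int)) := by
    rw [PySem.List.pyRange_neg_one]
    rw [PySem.Str.len_eq]
    rw [show ((-2 : Int) - (-(dna1.toList.length:Int) - 2)).toNat = dna1.toList.length by omega]
  rw [hrange, List.foldl_map]
  by_cases hne : dna1 = dna
  · rw [PySem.List.foldl_congr_mem _ _ (fun st _ => st) _ (fun st k _ => by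
      unfold jStep; rw [if_pos (by simpa using hne)])]
    rw [PySem.List.foldl_ignore]
    rw [if_neg (by rintro ⟨h, _⟩; exact h hne)]
    simp
  · rw [PySem.List.foldl_congr_mem _ _ (fun st k => cleanStep dna sub dna1 st k) _
      (fun st k hk => jStep_eq_cleanStep dna sub dna1 hne k (List.mem_range.mp hk) st)]
    rw [cleanLoop_inv dna sub dna1 acc dna1.toList.length le_rfl]
    by_cases hs : sub.toList ≠ [] ∧ sub.toList <:+ dna1.toList
    · rw [if_pos ⟨hs.1, hs.2, hs.2.length_le⟩, if_pos ⟨hne, by simp [suffB, hs.1, hs.2]⟩]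
    · rw [if_neg (by rintro ⟨a, b, _⟩; exact hs ⟨a, b⟩), if_neg (by
        rintro ⟨_, hb⟩
        simp only [suffB, decide_eq_true_eq] at hb
        exact hs hb)]
      simp

-- a prefix is found at index 0
lemma find_prefix_zero (s p : String) (h : p.toList <+: s.toList) :
    PySem.Str.find s p = 0 := by
  rcases eq_or_ne p.toList [] with hnil | hnil
  · simp [PySem.Str.find_eq, hnil, PySem.Chars.find_nil]
  · have h0 : 0 ≤ PySem.Chars.find s.toList p.toList :=
      (PySem.Chars.find_nonneg_iff s.toList p.toList).mpr h.isInfix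
    by_contra hne
    have hpos : 0 < (PySem.Chars.find s.toList p.toList).toNat := by
      simp only [PySem.Str.find_eq] at hne
      omega
    have := (PySem.Chars.find_spec h0).2 0 hpos
    rw [List.drop_zero] at this
    exact this h

-- cat_strings on a tuple whose third component is a prefix of the first
lemma cat_strings_eq (dna dna1 sub : String) (h : sub.toList <+: dna.toList) :
    cat_strings (dna, dna1, sub) = dna1 ++ PySem.Str.replace dna sub "" := by
  unfold cat_strings
  rw [if_pos (find_prefix_zero dna sub h)]
  simp

-- closed form of A's dna1-loop
lemma dna1_fold (list1 : List String) (dna sub : String) (acc : List (String × String × String)) :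
    list1.foldl (fun acc dna1 =>
        ((PySem.List.pyRange (-2) (-(PySem.Str.len dna1) - 2) (-1)).foldl
          (jStep dna sub dna1) (acc, 0)).1) acc
      = acc ++ (list1.filter (fun dna1 => decide (dna1 ≠ dna) && suffB sub dna1)).map
          (fun dna1 => (dna, dna1, sub)) := by
  rw [PySem.List.foldl_congr_mem _ _
    (fun acc dna1 => if (decide (dna1 ≠ dna) && suffB sub dna1) then acc ++ [(dna, dna1, sub)] else acc) _
    (fun acc dna1 _ => by
      beta_reduce
      rw [jLoop_eq]
      by_cases h : dna1 ≠ dna ∧ suffB sub dna1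
      · rw [if_pos h, if_pos (by simp [h.1, h.2])]
      · rw [if_neg h, if_neg (by
          intro hb
          simp only [Bool.and_eq_true, decide_eq_true_eq] at hb
          exact h ⟨hb.1, hb.2⟩), List.append_nil])]
  exact PySem.List.foldl_append_if _ _ list1 acc

-- dna[:i] is pref dna i
lemma sub_eq_pref (dna : String) (i : Nat) :
    PySem.Str.slice dna none (some (i : Int)) = pref dna i := by
  apply String.toList_inj.mp
  rw [PySem.Str.toList_slice, PySem.Chars.slice_eq_listSlice, PySem.List.slice_to_natCast]
  simp [pref]

-- closed form of A's i-loop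
lemma i_fold (list1 : List String) (dna : String) (acc : List (String × String × String)) :
    (PySem.List.pyRange 0 (PySem.Str.len dna) 1).foldl (fun acc i =>
        let sub := PySem.Str.slice dna none (some i)
        list1.foldl (fun acc dna1 =>
          ((PySem.List.pyRange (-2) (-(PySem.Str.len dna1) - 2) (-1)).foldl
            (jStep dna sub dna1) (acc, 0)).1) acc) acc
      = acc ++ (List.range dna.toList.length).flatMap (fun i =>
          (list1.filter (fun dna1 => decide (dna1 ≠ dna) && suffB (pref dna i) dna1)).map
            (fun dna1 => (dna, dna1, pref dna i))) := by
  rw [PySem.Str.len_eq, PySem.List.pyRange_zero_nat, List.foldl_map]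
  rw [PySem.List.foldl_congr_mem _ _
    (fun acc k => acc ++ (list1.filter (fun dna1 => decide (dna1 ≠ dna) && suffB (pref dna k) dna1)).map
      (fun dna1 => (dna, dna1, pref dna k))) _
    (fun acc k _ => by
      beta_reduce
      rw [sub_eq_pref, dna1_fold])]
  exact PySem.List.foldl_append_eq_flatMap _ _ acc

-- closed form of A
lemma A_eq (list1 : List String) :
    check_for_match list1
      = list1.flatMap (fun dna =>
          (List.range dna.toList.length).flatMap (fun i =>
            ((list1.filter (fun dna1 => decide (dna1 ≠ dna) && suffB (pref dna i) dna1)).map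
              (fun dna1 => dna1 ++ PySem.Str.replace dna (pref dna i) "")))) := by
  unfold check_for_match
  simp only
  rw [PySem.List.foldl_append_singleton_eq_map, List.nil_append]
  rw [PySem.List.foldl_congr_mem _ _
    (fun acc dna => acc ++ (List.range dna.toList.length).flatMap (fun i =>
      (list1.filter (fun dna1 => decide (dna1 ≠ dna) && suffB (pref dna i) dna1)).map
        (fun dna1 => (dna, dna1, pref dna i)))) _
    (fun acc dna _ => i_fold list1 dna acc)]
  rw [PySem.List.foldl_append_eq_flatMap, List.nil_append, List.map_flatMap]
  congr 1
  funext dna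
  rw [List.map_flatMap]
  congr 1
  funext i
  rw [List.map_map]
  refine List.map_congr_left (fun dna1 _ => ?_)
  show cat_strings (dna, dna1, pref dna i) = _
  exact cat_strings_eq dna dna1 (pref dna i)
    (by simpa [pref, String.toList_ofList] using List.take_prefix i dna.toList)

-- ---- B side ----

-- the key inserted for s at loop counter k
def keyStr (s : String) (k : Nat) : String := String.ofList (s.toList.drop (s.toList.length - (1 + k)))

lemma key_slice (s : String) (k : Nat) :
    PySem.Str.slice s (some (-(1 + (k : Nat) : Int))) none = keyStr s k := by
  apply String.toList_inj.mp
  rw [PySem.Str.toList_slice, PySem.Chars.slice_eq_listSlice]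
  rw [show (-(1 + (k : Nat) : Int)) = -((1 + k : Nat) : Int) by push_cast; ring]
  rw [PySem.List.slice_from_neg_natCast _ _ (by omega)]
  simp [keyStr]

-- which loop counters of the index build produce the key p: exactly one iff suffB p s
lemma filter_keys (s p : String) (n : Nat) (hn : n = s.toList.length) :
    (List.range n).filter (fun k => keyStr s k == p)
      = if suffB p s then [p.toList.length - 1] else [] := by
  subst hn
  have hiff : ∀ k, k < s.toList.length →
      ((keyStr s k == p) = true ↔ (p.toList <:+ s.toList ∧ p.toList.length = k + 1)) := by
    intro k hk
    rw [beq_iff_eq]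
    constructor
    · intro h
      refine (drop_eq_iff s.toList p.toList k hk).mp ?_
      rw [← h]; simp [keyStr, Nat.add_comm]
    · intro h
      have := (drop_eq_iff s.toList p.toList k hk).mpr h
      apply String.toList_inj.mp
      rw [show keyStr s k = String.ofList (s.toList.drop (s.toList.length - (k+1))) by
        simp [keyStr, Nat.add_comm]]
      rw [String.toList_ofList]
      exact this
  by_cases hc : suffB p s
  · simp only [suffB, decide_eq_true_eq] at hc
    obtain ⟨hne, hsuf⟩ := hc
    have h1 : 1 ≤ p.toList.length := by
      cases hpl : p.toList with
      | nil => exact absurd hpl hne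
      | cons a t => simp
    have hlen : p.toList.length ≤ s.toList.length := hsuf.length_le
    rw [if_pos (by simp [suffB, hne, hsuf])]
    rw [List.filter_congr (q := fun k => k == p.toList.length - 1) (fun k hk => by
      rw [List.mem_range] at hk
      by_cases he : k = p.toList.length - 1
      · subst he
        simp only [beq_self_eq_true]
        rw [(hiff _ hk).mpr ⟨hsuf, by omega⟩]
      · show (keyStr s k == p) = (k == p.toList.length - 1)
        have hf : (k == p.toList.length - 1) = false := by
          simp only [beq_eq_false_iff_ne, ne_eq]
          exact he
        rw [hf, Bool.eq_false_iff]
        intro hcon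
        have := (hiff _ hk).mp hcon
        omega)]
    have hlt : p.length - 1 < s.length := by
      have h1' : p.toList.length = p.length := by simp
      have h2' : s.toList.length = s.length := by simp
      omega
    simp [List.filter_beq, List.count_range, hlt]
  · rw [if_neg hc]
    simp only [suffB, decide_eq_true_eq, not_and_or] at hc
    apply List.filter_eq_nil_iff.mpr
    intro k hk
    rw [List.mem_range] at hk
    intro hcon
    have := (hiff _ hk).mp hcon
    rcases hc with h | h
    · exact h (by intro hnil; rw [hnil] at this; simp at this)
    · exact h this.1

-- one step of the index build, observed through a lookup
lemma inner_index (s : String) (d : PySem.Dict String (List String)) (p : String) :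
    ((PySem.List.pyRange 1 (PySem.Str.len s + 1) 1).foldl
        (fun d k => d.modify (PySem.Str.slice s (some (-k)) none) [] (· ++ [s])) d).getD p []
      = d.getD p [] ++ (if suffB p s then [s] else []) := by
  have hr : PySem.List.pyRange 1 (PySem.Str.len s + 1) 1
      = (List.range s.toList.length).map (fun k : Nat => (1 : Int) + (k : Int)) := by
    rw [PySem.Str.len_eq, PySem.List.pyRange_one]
    rw [show ((s.toList.length : Int) + 1 - 1).toNat = s.toList.length by omega]
  rw [hr, List.foldl_map]
  rw [PySem.List.foldl_congr_mem _ _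
    (fun d (k : Nat) => d.modify (keyStr s k) [] (· ++ [s])) _
    (fun d k _ => by
      beta_reduce
      rw [show (-(1 + (k : Int))) = (-(1 + (k : Nat) : Int)) by norm_num, key_slice])]
  rw [show (List.range s.toList.length).foldl (fun d (k : Nat) => d.modify (keyStr s k) [] (· ++ [s])) d
      = ((List.range s.toList.length).map (fun k => (keyStr s k, s))).foldl
          (fun d pr => d.modify pr.1 [] (· ++ [pr.2])) d by rw [List.foldl_map]]
  rw [PySem.Dict.getD_foldl_modify_append]
  congr 1
  rw [List.filter_map, List.map_map]
  rw [show ((fun pr : String × String => pr.1 == p) ∘ fun k => (keyStr s k, s))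
      = fun k => keyStr s k == p from rfl]
  rw [filter_keys s p _ rfl]
  by_cases hc : suffB p s
  · simp [hc]
  · simp [hc]

lemma index_getD_aux (list1 : List String) (p : String) :
    ∀ d : PySem.Dict String (List String),
    (list1.foldl (fun d s =>
      (PySem.List.pyRange 1 (PySem.Str.len s + 1) 1).foldl
        (fun d k => d.modify (PySem.Str.slice s (some (-k)) none) [] (· ++ [s])) d) d).getD p []
    = d.getD p [] ++ list1.filter (fun s => suffB p s) := by
  induction list1 with
  | nil => simp
  | cons s ls ih =>
      intro d
      rw [List.foldl_cons, ih, inner_index, List.filter_cons, List.append_assoc]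
      by_cases hc : suffB p s
      · simp [hc]
      · simp [hc]

-- the suffix index looks up exactly the strings having p as a non-empty suffix
lemma index_getD (list1 : List String) (p : String) :
    (list1.foldl (fun d s =>
      (PySem.List.pyRange 1 (PySem.Str.len s + 1) 1).foldl
        (fun d k => d.modify (PySem.Str.slice s (some (-k)) none) [] (· ++ [s])) d)
      PySem.Dict.empty).getD p []
    = list1.filter (fun s => suffB p s) := by
  rw [index_getD_aux, PySem.Dict.getD_empty, List.nil_append]

-- closed form of B's lookup loop
lemma B_inner (list1 : List String) (dna p : String) (out : List String) :
    (list1.filter (fun s => suffB p s)).foldl (fun out dna1 =>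
        if dna1 ≠ dna then out ++ [dna1 ++ PySem.Str.replace dna p ""] else out) out
      = out ++ (list1.filter (fun dna1 => decide (dna1 ≠ dna) && suffB p dna1)).map
          (fun dna1 => dna1 ++ PySem.Str.replace dna p "") := by
  have h1 : (list1.filter (fun s => suffB p s)).foldl (fun out dna1 =>
        if dna1 ≠ dna then out ++ [dna1 ++ PySem.Str.replace dna p ""] else out) out
      = (list1.filter (fun s => suffB p s)).foldl (fun out dna1 =>
        if decide (dna1 ≠ dna) = true then out ++ [dna1 ++ PySem.Str.replace dna p ""] else out) out := by
    apply PySem.List.foldl_congr_mem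
    intro acc x _
    by_cases h : x = dna <;> simp [h]
  rw [h1, PySem.List.foldl_append_if, List.filter_filter]

-- closed form of B
lemma B_eq (list1 : List String) :
    check_for_match_alt list1
      = list1.flatMap (fun dna =>
          (List.range (dna.toList.length - 1)).flatMap (fun k =>
            ((list1.filter (fun dna1 => decide (dna1 ≠ dna) && suffB (pref dna (1 + k)) dna1)).map
              (fun dna1 => dna1 ++ PySem.Str.replace dna (pref dna (1 + k)) "")))) := by
  unfold check_for_match_alt
  simp only
  rw [PySem.List.foldl_congr_mem _ _
    (fun out dna => out ++ (List.range (dna.toList.length - 1)).flatMap (fun k =>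
      ((list1.filter (fun dna1 => decide (dna1 ≠ dna) && suffB (pref dna (1 + k)) dna1)).map
        (fun dna1 => dna1 ++ PySem.Str.replace dna (pref dna (1 + k)) "")))) _
    (fun out dna _ => by
      beta_reduce
      have hr : PySem.List.pyRange 1 (PySem.Str.len dna) 1
          = (List.range (dna.toList.length - 1)).map (fun k : Nat => (1 : Int) + (k : Int)) := by
        rw [PySem.Str.len_eq, PySem.List.pyRange_one]
        rw [show ((dna.toList.length : Int) - 1).toNat = dna.toList.length - 1 by omega]
      rw [hr, List.foldl_map]
      rw [PySem.List.foldl_congr_mem _ _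
        (fun out (k : Nat) => out ++ (list1.filter (fun dna1 => decide (dna1 ≠ dna) && suffB (pref dna (1 + k)) dna1)).map
          (fun dna1 => dna1 ++ PySem.Str.replace dna (pref dna (1 + k)) "")) _
        (fun out k _ => by
          beta_reduce
          rw [show ((1 : Int) + (k : Int)) = ((1 + k : Nat) : Int) by push_cast; ring]
          rw [sub_eq_pref, index_getD, B_inner])]
      exact PySem.List.foldl_append_eq_flatMap _ _ out)]
  rw [PySem.List.foldl_append_eq_flatMap, List.nil_append]

-- the i = 0 term of A's middle loop is empty (the empty prefix is never a non-empty suffix)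
lemma term_zero (list1 : List String) (dna : String) :
    (list1.filter (fun dna1 => decide (dna1 ≠ dna) && suffB (pref dna 0) dna1)).map
      (fun dna1 => dna1 ++ PySem.Str.replace dna (pref dna 0) "") = [] := by
  rw [show list1.filter (fun dna1 => decide (dna1 ≠ dna) && suffB (pref dna 0) dna1) = [] from ?_]
  · rfl
  apply List.filter_eq_nil_iff.mpr
  intro x _
  simp [suffB, pref]

-- ===== VERDICT (by name: the statement is the Claim_ definition above) =====
theorem check_for_match_spec : Claim_equal_check_for_match := by
  intro list1 _
  show check_for_match list1 = check_for_match_alt list1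
  rw [A_eq, B_eq]
  congr 1
  funext dna
  cases hn : dna.toList.length with
  | zero => simp
  | succ m =>
      rw [List.range_succ_eq_map, List.flatMap_cons, term_zero, List.nil_append,
        List.flatMap_map]
      rw [show m + 1 - 1 = m by omega]
      refine List.flatMap_congr (fun k _ => ?_)
      rw [show k.succ = 1 + k by omega]
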